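-- pv_equiv track=rewrite | github.com/ckoesner/advent-of-code | 2023/python/07.py | compute_num_tuples_per_size
-- ===== SOURCE A (Python) =====
-- def compute_num_tuples_per_size(hand):
--     hand_copy = hand
--     tuples = {1: 0, 2: 0, 3: 0, 4: 0, 5: 0}
--     for card in hand_copy:
--         len1 = len(hand)
--         hand = hand.replace(card, "")
--         diff = len1 - len(hand)
--         if diff != 0:
--             tuples[diff] += 1
--     return tuples
-- ===== SOURCE B (Python) =====
-- def compute_num_tuples_per_size(hand):
--     counts = {}
--     for card in hand:
--         counts[card] = counts.get(card, 0) + 1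
--     tuples = {1: 0, 2: 0, 3: 0, 4: 0, 5: 0}
--     for count in counts.values():
--         tuples[count] += 1
--     return tuples
-- ===== Notes on version B (the rewrite author's own statement) =====
-- stated objective: idiomatic
-- what changed: B builds a frequency table of the cards in one pass and then tallies the distinct multiplicities, instead of A's repeated str.replace scans that shrink the hand while iterating.
import Mathlib
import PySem

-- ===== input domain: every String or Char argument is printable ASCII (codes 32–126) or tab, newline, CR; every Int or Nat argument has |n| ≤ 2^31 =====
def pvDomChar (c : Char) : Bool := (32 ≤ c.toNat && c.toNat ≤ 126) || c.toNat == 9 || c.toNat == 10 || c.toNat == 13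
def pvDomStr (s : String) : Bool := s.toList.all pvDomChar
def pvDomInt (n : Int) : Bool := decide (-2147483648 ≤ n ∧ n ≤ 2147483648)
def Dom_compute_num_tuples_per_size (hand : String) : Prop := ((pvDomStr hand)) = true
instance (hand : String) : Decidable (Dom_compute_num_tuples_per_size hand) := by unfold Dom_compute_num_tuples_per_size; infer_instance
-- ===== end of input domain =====

-- B replaces A's repeated str.replace scans over a shrinking hand by one counting pass plus a tally of the distinct multiplicities (idiomatic; return value only).


-- ===== PORT A =====
-- Python's `tuples[diff] += 1` raises KeyError when diff ∉ {1..5}; Pre_ excludes exactly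
-- those inputs, and there the port uses Dict.modify (exact wherever the Python returns).
def compute_num_tuples_per_size (hand : String) : List (Int × Int) :=
  let tuples : PySem.Dict Int Int := PySem.Dict.ofList [(1, 0), (2, 0), (3, 0), (4, 0), (5, 0)]
  let st := hand.toList.foldl
    (fun (st : List Char × PySem.Dict Int Int) card =>
      let hd := st.1
      let len1 : Int := hd.length
      let hd' := PySem.Chars.replace hd [card] []
      let diff : Int := len1 - hd'.length
      if diff ≠ 0 then (hd', st.2.modify diff 0 (· + 1)) else (hd', st.2))
    (hand.toList, tuples)
  st.2.items

-- ===== PORT B =====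
-- same note as for A: `tuples[count] += 1` is Dict.modify, exact wherever the Python returns
def compute_num_tuples_per_size_alt (hand : String) : List (Int × Int) :=
  let counts := hand.toList.foldl
    (fun (d : PySem.Dict Char Int) card => d.insert card (d.getD card 0 + 1)) PySem.Dict.empty
  let tuples : PySem.Dict Int Int := PySem.Dict.ofList [(1, 0), (2, 0), (3, 0), (4, 0), (5, 0)]
  let t := counts.values.foldl (fun (d : PySem.Dict Int Int) count => d.modify count 0 (· + 1)) tuples
  t.items

-- ===== PRECONDITION & SPEC =====
-- Pre_ excludes exactly the hands with a card occurring more than 5 times, on which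
-- Python A (and Python B alike) raises KeyError.
def Pre_compute_num_tuples_per_size (hand : String) : Prop :=
  (hand.toList.all (fun c => hand.toList.count c ≤ 5)) = true
instance (hand : String) : Decidable (Pre_compute_num_tuples_per_size hand) := by
  unfold Pre_compute_num_tuples_per_size; infer_instance

def pvWitness_compute_num_tuples_per_size : String := "AABBC"

def Spec_compute_num_tuples_per_size (hand : String) (out : List (Int × Int)) : Prop := out = compute_num_tuples_per_size_alt hand
instance (hand : String) (out : List (Int × Int)) : Decidable (Spec_compute_num_tuples_per_size hand out) := by unfold Spec_compute_num_tuples_per_size; infer_instance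

-- ===== CLAIM (what is proved, stated in full; the proofs are below) =====
def Claim_equal_compute_num_tuples_per_size : Prop := ∀ (hand : String), Dom_compute_num_tuples_per_size hand → Pre_compute_num_tuples_per_size hand → Spec_compute_num_tuples_per_size hand (compute_num_tuples_per_size hand)

-- ===== LEMMAS AND PROOFS =====

-- replace with a one-char pattern and empty replacement is a filter
theorem pv_replace_go_filter (c : Char) : ∀ (l : List Char) (fuel : Nat) (acc : List Char),
    l.length ≤ fuel →
    PySem.Chars.replace.go [c] [] fuel l acc = acc.reverse ++ l.filter (· ≠ c) := by
  intro l
  induction l with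
  | nil =>
    intro fuel acc _
    cases fuel <;> simp [PySem.Chars.replace.go]
  | cons x t ih =>
    intro fuel acc hf
    cases fuel with
    | zero => simp at hf
    | succ n =>
      by_cases hx : x = c
      · subst hx
        rw [PySem.Chars.replace.go]
        simp only [List.isPrefixOf, BEq.rfl, Bool.true_and, if_true, List.length_singleton,
          List.drop_one, List.tail_cons, List.reverse_nil, List.nil_append]
        rw [ih n acc (by simpa using Nat.le_of_succ_le_succ hf)]
        simp
      · rw [PySem.Chars.replace.go]
        have hpre : List.isPrefixOf [c] (x :: t) = false := by
          simp [List.isPrefixOf]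
          exact fun h => absurd h.symm hx
        rw [hpre]
        simp only [Bool.false_eq_true, if_false]
        rw [ih n (x :: acc) (by simpa using Nat.le_of_succ_le_succ hf)]
        simp [hx]

theorem pv_replace_filter (h : List Char) (c : Char) :
    PySem.Chars.replace h [c] [] = h.filter (· ≠ c) := by
  rw [PySem.Chars.replace]
  simp only [List.isEmpty_cons, Bool.false_eq_true, if_false]
  simpa using pv_replace_go_filter c h h.length [] le_rfl

theorem pv_filter_count_len (h : List Char) (c : Char) :
    (h.filter (· ≠ c)).length + h.count c = h.length := by
  induction h with
  | nil => simp
  | cons x t ih =>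
    by_cases hx : x = c
    · subst hx
      rw [List.filter_cons_of_neg (by simp), List.count_cons_self, List.length_cons]
      omega
    · rw [List.filter_cons_of_pos (by simp [hx]), List.count_cons_of_ne hx,
        List.length_cons, List.length_cons]
      omega

theorem pv_filter_not_mem (h : List Char) (c : Char) (hc : c ∉ h) :
    h.filter (· ≠ c) = h := by
  apply List.filter_eq_self.mpr
  intro a ha
  simp
  exact fun e => hc (e ▸ ha)

-- the step of A's loop, in closed form
def pv_stepA (st : List Char × PySem.Dict Int Int) (card : Char) : List Char × PySem.Dict Int Int :=
  let hd := st.1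
  let len1 : Int := hd.length
  let hd' := PySem.Chars.replace hd [card] []
  let diff : Int := len1 - hd'.length
  if diff ≠ 0 then (hd', st.2.modify diff 0 (· + 1)) else (hd', st.2)

theorem pv_stepA_spec (h : List Char) (d : PySem.Dict Int Int) (c : Char) :
    pv_stepA (h, d) c
      = if c ∈ h then (h.filter (· ≠ c), d.modify ((h.count c : Int)) 0 (· + 1)) else (h, d) := by
  unfold pv_stepA
  simp only [pv_replace_filter]
  have hlen : ((h.length : Int) - ((h.filter (· ≠ c)).length : Int)) = (h.count c : Int) := by
    have := pv_filter_count_len h c; omega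
  rw [hlen]
  by_cases hc : c ∈ h
  · have hne : (h.count c : Int) ≠ 0 := by
      have := List.count_pos_iff.mpr hc; omega
    rw [if_pos hne, if_pos hc]
  · have h0 : h.count c = 0 := List.count_eq_zero.mpr hc
    rw [h0, if_neg (by simp), if_neg hc, pv_filter_not_mem h c hc]

-- the sequence of keys A's loop increments: the distinct remaining cards in
-- first-occurrence order, each mapped to its multiplicity
def pv_seqA : List Char → List Char → List Int
  | _, [] => []
  | h, c :: rest =>
      if c ∈ h then (h.count c : Int) :: pv_seqA (h.filter (· ≠ c)) rest
      else pv_seqA h rest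

theorem pv_A_loop (rest : List Char) : ∀ (h : List Char) (d : PySem.Dict Int Int),
    (rest.foldl pv_stepA (h, d)).2
      = (pv_seqA h rest).foldl (fun d k => d.modify k 0 (· + 1)) d := by
  induction rest with
  | nil => intro h d; rfl
  | cons c rest ih =>
    intro h d
    rw [List.foldl_cons, pv_stepA_spec]
    by_cases hc : c ∈ h
    · rw [if_pos hc, ih]
      simp only [pv_seqA, if_pos hc, List.foldl_cons]
    · rw [if_neg hc, ih]
      simp only [pv_seqA, if_neg hc]

-- first-occurrence dedup peels its head
theorem pv_foldl_add_mem (c : Char) (xs : List Char) : ∀ (s : PySem.Set Char), c ∈ s →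
    xs.foldl PySem.Set.add s = (xs.filter (· ≠ c)).foldl PySem.Set.add s := by
  induction xs with
  | nil => intro s _; simp
  | cons x t ih =>
    intro s hs
    by_cases hx : x = c
    · subst hx
      have hadd : PySem.Set.add s x = s := by simp [PySem.Set.add, hs]
      rw [List.filter_cons_of_neg (by simp), List.foldl_cons, hadd, ih s hs]
    · have hmem : c ∈ PySem.Set.add s x := (PySem.Set.mem_add s x c).mpr (Or.inl hs)
      rw [List.filter_cons_of_pos (by simp [hx]), List.foldl_cons, List.foldl_cons,
        ih _ hmem]

theorem pv_foldl_add_cons (ys : List Char) : ∀ (s : List Char) (c : Char),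
    (∀ y ∈ ys, y ≠ c) →
    ys.foldl PySem.Set.add (c :: s) = c :: ys.foldl PySem.Set.add s := by
  induction ys with
  | nil => intro s c _; rfl
  | cons y t ih =>
    intro s c hy
    have hyc : y ≠ c := hy y (by simp)
    have hstep : PySem.Set.add (c :: s) y = c :: PySem.Set.add s y := by
      by_cases hys : y ∈ s <;> simp [PySem.Set.add, hys, hyc]
    rw [List.foldl_cons, hstep, List.foldl_cons,
      ih (PySem.Set.add s y) c (fun z hz => hy z (by simp [hz]))]

theorem pv_ofList_cons (c : Char) (xs : List Char) :
    PySem.Set.ofList (c :: xs) = c :: PySem.Set.ofList (xs.filter (· ≠ c)) := by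
  show (c :: xs).foldl PySem.Set.add PySem.Set.empty = _
  rw [List.foldl_cons]
  have h1 : PySem.Set.add PySem.Set.empty c = [c] := rfl
  rw [h1, pv_foldl_add_mem c xs [c] (by simp)]
  exact pv_foldl_add_cons _ [] c (fun y hy => by simp at hy; exact hy.2)

theorem pv_seqA_spec (rest : List Char) : ∀ (h : List Char),
    pv_seqA h rest
      = (PySem.Set.ofList (rest.filter (· ∈ h))).map (fun c => (h.count c : Int)) := by
  induction rest with
  | nil => intro h; simp [pv_seqA, PySem.Set.ofList, PySem.Set.empty]
  | cons c rest ih =>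
    intro h
    by_cases hc : c ∈ h
    · rw [List.filter_cons_of_pos (by simp [hc]), pv_ofList_cons]
      simp only [List.map_cons, pv_seqA, if_pos hc]
      congr 1
      rw [ih (h.filter (· ≠ c))]
      have hff : (rest.filter (· ∈ h)).filter (· ≠ c)
          = rest.filter (· ∈ h.filter (· ≠ c)) := by
        rw [List.filter_filter]
        apply List.filter_congr
        intro x _
        by_cases hxc : x = c <;> by_cases hxh : x ∈ h <;> simp [hxc, hxh, List.mem_filter]
      rw [hff]
      apply List.map_congr_left
      intro x hx
      have hxmem := (PySem.Set.mem_ofList _ x).mp hx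
      have hxne : x ≠ c := by
        rcases List.mem_filter.mp hxmem with ⟨_, hcond⟩
        simp [List.mem_filter] at hcond
        exact hcond.2
      rw [List.count_filter]
      simp [hxne]
    · rw [List.filter_cons_of_neg (by simp [hc])]
      simp only [pv_seqA, if_neg hc]
      exact ih h

-- ===== VERDICT (by name: the statement is the Claim_ definition above) =====
theorem compute_num_tuples_per_size_spec : Claim_equal_compute_num_tuples_per_size := by
  intro hand _ _
  unfold Spec_compute_num_tuples_per_size
  unfold compute_num_tuples_per_size compute_num_tuples_per_size_alt
  have hlam : (fun (st : List Char × PySem.Dict Int Int) card =>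
      let hd := st.1
      let len1 : Int := hd.length
      let hd' := PySem.Chars.replace hd [card] []
      let diff : Int := len1 - hd'.length
      if diff ≠ 0 then (hd', st.2.modify diff 0 (· + 1)) else (hd', st.2)) = pv_stepA := rfl
  rw [hlam]
  dsimp only
  congr 1
  rw [pv_A_loop hand.toList hand.toList _]
  rw [PySem.Dict.foldl_insert_getD_add_one_eq_counter]
  have hvals : (PySem.Dict.counter hand.toList).values
      = (PySem.Set.ofList hand.toList).map (fun c => (hand.toList.count c : Int)) := by
    show (PySem.Dict.counter hand.toList).items.map (·.2) = _
    rw [PySem.Dict.items_counter]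
    rw [List.map_map]
    rfl
  rw [hvals, pv_seqA_spec hand.toList hand.toList]
  have hself : hand.toList.filter (· ∈ hand.toList) = hand.toList :=
    List.filter_eq_self.mpr (fun a ha => by simp [ha])
  rw [hself]
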